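-- pv_equiv track=rewrite | github.com/fifosk/ebook-tools | ebook-tools.py | merge_single_char_sentences
-- ===== SOURCE A (Python) =====
-- def merge_single_char_sentences(sentences):
--     if not sentences:
--         return sentences
--     merged = [sentences[0]]
--     for sentence in sentences[1:]:
--         if len(sentence.strip()) == 1:
--             merged[-1] = merged[-1] + " " + sentence
--         else:
--             merged.append(sentence)
--     return merged
-- ===== SOURCE B (Python) =====
-- def merge_single_char_sentences(sentences):
--     if not sentences:
--         return sentences
--     # pass 1: assign a group id to every sentence (a new id starts at every
--     # sentence that is not single-char after stripping; the first always starts one)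
--     keys = [1]
--     k = 1
--     for s in sentences[1:]:
--         if len(s.strip()) != 1:
--             k += 1
--         keys.append(k)
--     # pass 2: group consecutive equal ids and space-join each group
--     out = []
--     group = []
--     prev = None
--     for key, s in zip(keys, sentences):
--         if key != prev:
--             if group:
--                 out.append(" ".join(group))
--             group = [s]
--             prev = key
--         else:
--             group.append(s)
--     out.append(" ".join(group))
--     return out
-- ===== Notes on version B (the rewrite author's own statement) =====
-- stated objective: alternative
-- what changed: A folds single-char sentences into the last element of the growing output by repeated string concatenation; B instead assigns every sentence a group id in a first pass, then groups consecutive equal ids and space-joins each group in a second pass.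
import Mathlib
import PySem

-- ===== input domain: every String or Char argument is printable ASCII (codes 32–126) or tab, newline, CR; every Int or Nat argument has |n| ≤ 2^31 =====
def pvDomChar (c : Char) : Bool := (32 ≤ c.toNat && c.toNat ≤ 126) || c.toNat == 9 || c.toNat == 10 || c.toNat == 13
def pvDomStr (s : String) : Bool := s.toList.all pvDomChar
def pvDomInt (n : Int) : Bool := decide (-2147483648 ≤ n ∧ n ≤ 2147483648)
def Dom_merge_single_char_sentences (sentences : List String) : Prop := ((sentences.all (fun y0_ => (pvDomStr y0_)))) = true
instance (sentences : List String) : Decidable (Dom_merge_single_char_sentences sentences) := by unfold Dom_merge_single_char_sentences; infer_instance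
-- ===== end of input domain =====

-- B replaces A's fold-into-last-element concatenation by a two-pass shape (assign group
-- ids, then group consecutive equal ids and space-join each group); alternative, not faster.


-- ===== PORT A =====
def merge_single_char_sentences (sentences : List String) : List String :=
  match sentences with
  | [] => sentences
  | s0 :: rest =>
    -- merged = [sentences[0]]; for sentence in sentences[1:]: …
    rest.foldl
      (fun merged sentence =>
        if PySem.Str.len (PySem.Str.strip sentence) = 1 then
          -- merged[-1] = merged[-1] + " " + sentence
          merged.dropLast ++ [merged.getLast! ++ " " ++ sentence]
        else
          merged ++ [sentence])
      [s0]

-- ===== PORT B =====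
def merge_single_char_sentences_alt (sentences : List String) : List String :=
  match sentences with
  | [] => sentences
  | s0 :: rest =>
    -- pass 1: keys = [1]; k = 1; for s in sentences[1:]: …
    let ks := rest.foldl
      (fun (st : Int × List Int) s =>
        let k := if PySem.Str.len (PySem.Str.strip s) ≠ 1 then st.1 + 1 else st.1
        (k, st.2 ++ [k]))
      (1, [1])
    -- pass 2: group consecutive equal ids, space-join each group
    let fin := (ks.2.zip (s0 :: rest)).foldl
      (fun (st : List String × List String × Option Int) p =>
        if some p.1 ≠ st.2.2 then
          ((if st.2.1 = [] then st.1 else st.1 ++ [PySem.Str.join " " st.2.1]),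
           [p.2], some p.1)
        else
          (st.1, st.2.1 ++ [p.2], st.2.2))
      ([], [], none)
    fin.1 ++ [PySem.Str.join " " fin.2.1]

-- ===== PRECONDITION & SPEC =====
def Spec_merge_single_char_sentences (sentences : List String) (out : List String) : Prop := out = merge_single_char_sentences_alt sentences
instance (sentences : List String) (out : List String) : Decidable (Spec_merge_single_char_sentences sentences out) := by unfold Spec_merge_single_char_sentences; infer_instance

-- ===== CLAIM (what is proved, stated in full; the proofs are below) =====
def Claim_equal_merge_single_char_sentences : Prop := ∀ (sentences : List String), Dom_merge_single_char_sentences sentences → Spec_merge_single_char_sentences sentences (merge_single_char_sentences sentences)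

-- ===== LEMMAS AND PROOFS =====

-- shared reference function: the merged list for first-group string c and remaining sentences
def pvGo (c : String) : List String → List String
  | [] => [c]
  | s :: ss =>
    if PySem.Str.len (PySem.Str.strip s) = 1 then pvGo (c ++ " " ++ s) ss
    else c :: pvGo s ss

-- the key list B's first pass produces for the tail, starting from counter k
def pvKeys (k : Int) : List String → List Int
  | [] => []
  | s :: ss =>
    if PySem.Str.len (PySem.Str.strip s) ≠ 1 then (k + 1) :: pvKeys (k + 1) ss
    else k :: pvKeys k ss

-- the final counter of B's first pass
def pvLastK (k : Int) : List String → Int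
  | [] => k
  | s :: ss =>
    if PySem.Str.len (PySem.Str.strip s) ≠ 1 then pvLastK (k + 1) ss else pvLastK k ss

theorem pv_join_singleton (s : String) : PySem.Str.join " " [s] = s := by
  rw [← String.toList_inj]
  simp [PySem.Str.toList_join, PySem.Chars.join_singleton]

theorem pv_join_cons_cons (p q : String) (rest : List String) :
    PySem.Str.join " " (p :: q :: rest) = p ++ " " ++ PySem.Str.join " " (q :: rest) := by
  rw [← String.toList_inj]
  simp [PySem.Str.toList_join, PySem.Chars.join_cons_cons]

theorem pv_join_concat (g : List String) (hg : g ≠ []) (s : String) :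
    PySem.Str.join " " (g ++ [s]) = PySem.Str.join " " g ++ " " ++ s := by
  induction g with
  | nil => cases hg rfl
  | cons a t ih =>
    cases t with
    | nil => simp [pv_join_cons_cons, pv_join_singleton]
    | cons b t' =>
      have := ih (by simp)
      simp only [List.cons_append] at this ⊢
      rw [pv_join_cons_cons, this, pv_join_cons_cons]
      simp [String.append_assoc]

-- A's loop equals pvGo
theorem pvA_loop (rest : List String) :
    ∀ (acc : List String) (c : String),
      rest.foldl
        (fun merged sentence =>
          if PySem.Str.len (PySem.Str.strip sentence) = 1 then
            merged.dropLast ++ [merged.getLast! ++ " " ++ sentence]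
          else merged ++ [sentence]) (acc ++ [c])
      = acc ++ pvGo c rest := by
  induction rest with
  | nil => intro acc c; simp [pvGo]
  | cons s ss ih =>
    intro acc c
    by_cases h : PySem.Str.len (PySem.Str.strip s) = 1
    · simp only [List.foldl_cons, if_pos h, List.dropLast_concat]
      have hL : (acc ++ [c]).getLast! = c := by
        simp
      rw [hL, ih acc (c ++ " " ++ s), pvGo, if_pos h]
    · simp only [List.foldl_cons, if_neg h]
      rw [pvGo, if_neg h]
      have := ih (acc ++ [c]) s
      rw [this]
      simp

-- B's first pass builds pvKeys
theorem pvB_keys (rest : List String) :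
    ∀ (k : Int) (acc : List Int),
      rest.foldl
        (fun (st : Int × List Int) s =>
          let k := if PySem.Str.len (PySem.Str.strip s) ≠ 1 then st.1 + 1 else st.1
          (k, st.2 ++ [k])) (k, acc)
      = (pvLastK k rest, acc ++ pvKeys k rest) := by
  induction rest with
  | nil => intro k acc; simp [pvLastK, pvKeys]
  | cons s ss ih =>
    intro k acc
    by_cases h : PySem.Str.len (PySem.Str.strip s) ≠ 1
    · simp only [List.foldl_cons, if_pos h, pvLastK, pvKeys, ih, List.append_assoc]
      simp
    · simp only [List.foldl_cons, if_neg h, pvLastK, pvKeys, ih, List.append_assoc]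
      simp

-- B's second pass from a nonempty current group equals pvGo of the joined group
theorem pvB_group (rest : List String) :
    ∀ (k : Int) (out g : List String), g ≠ [] →
      (let fin := ((pvKeys k rest).zip rest).foldl
        (fun (st : List String × List String × Option Int) p =>
          if some p.1 ≠ st.2.2 then
            ((if st.2.1 = [] then st.1 else st.1 ++ [PySem.Str.join " " st.2.1]),
             [p.2], some p.1)
          else
            (st.1, st.2.1 ++ [p.2], st.2.2))
        (out, g, some k)
      fin.1 ++ [PySem.Str.join " " fin.2.1])
      = out ++ pvGo (PySem.Str.join " " g) rest := by
  induction rest with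
  | nil => intro k out g hg; simp [pvKeys, pvGo]
  | cons s ss ih =>
    intro k out g hg
    by_cases h : PySem.Str.len (PySem.Str.strip s) ≠ 1
    · -- new group starts: key k+1 ≠ prev k
      simp only [pvKeys, if_pos h, List.zip_cons_cons, List.foldl_cons]
      rw [if_pos (by simp : some (k+1) ≠ some k), if_neg hg]
      have := ih (k + 1) (out ++ [PySem.Str.join " " g]) [s] (by simp)
      simp only at this ⊢
      rw [this, pv_join_singleton, pvGo, if_neg (by simpa using h), List.append_assoc]
      rfl
    · -- same group continues: key k = prev k
      simp only [pvKeys, if_neg h, List.zip_cons_cons, List.foldl_cons]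
      rw [if_neg (by simp : ¬ some k ≠ some k)]
      have := ih k out (g ++ [s]) (by simp)
      simp only at this ⊢
      rw [this, pv_join_concat g hg s, pvGo,
        if_pos (by simpa using h)]

-- ===== VERDICT (by name: the statement is the Claim_ definition above) =====
theorem merge_single_char_sentences_spec : Claim_equal_merge_single_char_sentences := by
  intro sentences _
  unfold Spec_merge_single_char_sentences merge_single_char_sentences merge_single_char_sentences_alt
  cases sentences with
  | nil => rfl
  | cons s0 rest =>
    simp only
    rw [pvB_keys rest 1 [1]]
    have hA := pvA_loop rest [] s0
    simp only [List.nil_append] at hA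
    rw [hA]
    -- first step of B's second pass: flushes nothing, starts group [s0] with prev = some 1
    simp only [List.singleton_append, List.zip_cons_cons, List.foldl_cons]
    simp only [reduceCtorEq, ne_eq, not_false_eq_true, if_true]
    have := pvB_group rest 1 [] [s0] (by simp)
    simp only [List.nil_append] at this
    rw [this, pv_join_singleton]
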